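-- pv_equiv track=rewrite | github.com/AadithiyaD/ProjectEuler | PythonAttempts/prob21.py | amicable_pair
-- ===== SOURCE A (Python) =====
-- def sumOfFactors(n):
--     results = []
--     for i in range(1,n):
--         if n % i == 0:
--             results.append(i)
--
--     return sum(results)
--
-- def amicable_pair(limit):
--     results = []
--
--     # Add +1 to include "limit"
--     for a in range(limit+1):
--         b = sumOfFactors(a)
--
--         # Using the definition provided in problem statement
--         if a != b and a == sumOfFactors(b):
--             results.append(a)
--             results.append(b)
--
--
--     # Returning sorted list for better visualization of results
--     return sorted(set(results))
-- ===== SOURCE B (Python) =====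
-- def amicable_pair(limit):
--     def sigma_proper(n):
--         # sum of all divisors via sqrt enumeration, then drop n itself
--         total = 0
--         i = 1
--         while i * i <= n:
--             if n % i == 0:
--                 total += i
--                 j = n // i
--                 if j != i:
--                     total += j
--             i += 1
--         return total - n if n > 0 else 0
--
--     res = set()
--     for a in range(limit + 1):
--         b = sigma_proper(a)
--         if a != b and sigma_proper(b) == a:
--             res.add(a)
--             res.add(b)
--     return sorted(res)
-- ===== Notes on version B (the rewrite author's own statement) =====
-- stated objective: faster
-- what changed: Replaces the O(n) trial-division proper-divisor sum with an O(sqrt(n)) paired-divisor enumeration and collects results in a set directly instead of a list deduplicated at the end.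
import Mathlib
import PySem

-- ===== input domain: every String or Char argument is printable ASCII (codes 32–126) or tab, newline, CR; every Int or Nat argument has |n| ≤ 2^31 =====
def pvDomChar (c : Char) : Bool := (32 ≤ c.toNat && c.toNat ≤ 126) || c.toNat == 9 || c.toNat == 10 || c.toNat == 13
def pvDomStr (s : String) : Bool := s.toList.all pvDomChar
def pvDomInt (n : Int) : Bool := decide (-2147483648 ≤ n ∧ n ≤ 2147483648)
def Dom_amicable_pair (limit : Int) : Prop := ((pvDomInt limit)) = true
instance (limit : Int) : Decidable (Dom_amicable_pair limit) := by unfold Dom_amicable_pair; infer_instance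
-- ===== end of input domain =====

-- B replaces A's O(n) trial-division divisor sum by an O(√n) paired-divisor enumeration
-- and collects results in a set directly instead of deduplicating a list at the end.

-- ===== PORT A =====
def sumOfFactors (n : Int) : Int :=
  ((PySem.List.pyRange 1 n).foldl
      (fun results i => if PySem.Int.mod n i = 0 then results ++ [i] else results) []).sum

def amicable_pair (limit : Int) : List Int :=
  let results := (PySem.List.pyRange 0 (limit + 1)).foldl
      (fun results a =>
        let b := sumOfFactors a
        if a ≠ b ∧ a = sumOfFactors b then (results ++ [a]) ++ [b] else results) []
  PySem.List.sorted (PySem.Set.ofList results) (fun x => x) false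

-- ===== PORT B =====
-- the 'while i * i <= n' loop of Source B's sigma_proper
def sigmaLoop (n i total : Int) : Int :=
  if _h : i * i ≤ n then
    let total :=
      if PySem.Int.mod n i = 0 then
        let t := total + i
        let j := PySem.Int.floordiv n i
        if j ≠ i then t + j else t
      else total
    sigmaLoop n (i + 1) total
  else total
termination_by (n + 1 - i).toNat
decreasing_by
  have h1 : 2 * i - 1 ≤ n := by nlinarith [sq_nonneg (i - 1)]
  have h2 : (0 : Int) ≤ n := by nlinarith [mul_self_nonneg i]
  omega

def sigma_proper (n : Int) : Int :=
  let total := sigmaLoop n 1 0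
  if n > 0 then total - n else 0

def amicable_pair_alt (limit : Int) : List Int :=
  let res := (PySem.List.pyRange 0 (limit + 1)).foldl
      (fun res a =>
        let b := sigma_proper a
        if a ≠ b ∧ a = sigma_proper b then PySem.Set.add (PySem.Set.add res a) b else res)
      PySem.Set.empty
  PySem.List.sorted res (fun x => x) false

-- ===== PRECONDITION & SPEC =====
def Spec_amicable_pair (limit : Int) (out : List Int) : Prop := out = amicable_pair_alt limit
instance (limit : Int) (out : List Int) : Decidable (Spec_amicable_pair limit out) := by unfold Spec_amicable_pair; infer_instance

-- ===== CLAIM (what is proved, stated in full; the proofs are below) =====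
def Claim_equal_amicable_pair : Prop := ∀ (limit : Int), Dom_amicable_pair limit → Spec_amicable_pair limit (amicable_pair limit)

-- ===== LEMMAS AND PROOFS =====

-- the set of divisors of m not yet handled when B's sqrt loop reaches i = k
def pendingDivs (m k : Nat) : Finset Nat :=
  (Finset.Ico 1 (m + 1)).filter (fun d => d ∣ m ∧ k ≤ d ∧ k ≤ m / d)

lemma pendingDivs_empty (m k : Nat) (hk : m < k * k) : pendingDivs m k = ∅ := by
  unfold pendingDivs
  rw [Finset.filter_eq_empty_iff]
  rintro d hd ⟨hdvd, h1, h2⟩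
  have hkk : k * k ≤ d * (m / d) := Nat.mul_le_mul h1 h2
  rw [Nat.mul_div_cancel' hdvd] at hkk
  omega

lemma pendingDivs_step_dvd (m k : Nat) (hk : 1 ≤ k) (hm : 1 ≤ m) (hdvd : k ∣ m)
    (hsq : k * k ≤ m) :
    pendingDivs m k = insert k (insert (m / k) (pendingDivs m (k + 1))) := by
  have hmk : m / k ∣ m := Nat.div_dvd_of_dvd hdvd
  have hkle : k ≤ m / k := (Nat.le_div_iff_mul_le (by omega)).2 hsq
  have hdds : m / (m / k) = k := Nat.div_div_self hdvd (by omega)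
  unfold pendingDivs
  ext d
  simp only [Finset.mem_insert, Finset.mem_filter, Finset.mem_Ico]
  constructor
  · rintro ⟨⟨h1, h2⟩, hdvd', hkd, hkm⟩
    by_cases hek : d = k
    · exact Or.inl hek
    by_cases hem : m / d = k
    · right; left
      have hmul : d * (m / d) = m := Nat.mul_div_cancel' hdvd'
      rw [hem] at hmul
      have h3 : m / k = d := by
        rw [← hmul, Nat.mul_div_cancel _ (by omega : 0 < k)]
      omega
    · right; right
      exact ⟨⟨h1, h2⟩, hdvd', by omega, by omega⟩
  · rintro (rfl | rfl | ⟨⟨h1, h2⟩, hdvd', hkd, hkm⟩)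
    · refine ⟨⟨hk, ?_⟩, hdvd, le_refl _, hkle⟩
      have := Nat.le_of_dvd (by omega) hdvd
      omega
    · refine ⟨⟨by omega, ?_⟩, hmk, hkle, by omega⟩
      have := Nat.le_of_dvd (by omega) hmk
      omega
    · exact ⟨⟨h1, h2⟩, hdvd', by omega, by omega⟩

lemma pendingDivs_step_not_dvd (m k : Nat) (hdvd : ¬ k ∣ m) :
    pendingDivs m k = pendingDivs m (k + 1) := by
  unfold pendingDivs
  ext d
  simp only [Finset.mem_filter, Finset.mem_Ico]
  constructor
  · rintro ⟨⟨h1, h2⟩, hdvd', hkd, hkm⟩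
    have hek : d ≠ k := by rintro rfl; exact hdvd hdvd'
    have hem : m / d ≠ k := by
      rintro hem
      have hmul : d * (m / d) = m := Nat.mul_div_cancel' hdvd'
      rw [hem] at hmul
      exact hdvd (Dvd.intro_left d hmul)
    exact ⟨⟨h1, h2⟩, hdvd', by omega, by omega⟩
  · rintro ⟨⟨h1, h2⟩, hdvd', hkd, hkm⟩
    exact ⟨⟨h1, h2⟩, hdvd', by omega, by omega⟩

lemma k_notmem_pending (m k : Nat) : k ∉ pendingDivs m (k + 1) := by
  unfold pendingDivs
  simp only [Finset.mem_filter, Finset.mem_Ico]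
  omega

lemma cof_notmem_pending (m k : Nat) (hm : 1 ≤ m) (hdvd : k ∣ m) :
    m / k ∉ pendingDivs m (k + 1) := by
  have hdds : m / (m / k) = k := Nat.div_div_self hdvd (by omega)
  unfold pendingDivs
  simp only [Finset.mem_filter, Finset.mem_Ico]
  omega

lemma sigmaLoop_inv (m : Nat) (hm : 1 ≤ m) :
    ∀ (fuel : Nat) (i t : Int), 1 ≤ i → ((m : Int) + 1 - i).toNat = fuel →
    sigmaLoop (m : Int) i t = t + ((∑ d ∈ pendingDivs m i.toNat, d : Nat) : Int) := by
  intro fuel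
  induction fuel with
  | zero =>
    intro i t hi hfuel
    have him : (m : Int) < i := by omega
    rw [sigmaLoop, dif_neg (by nlinarith)]
    have h2 : i.toNat ≤ i.toNat * i.toNat := Nat.le_mul_of_pos_left _ (by omega)
    rw [pendingDivs_empty m i.toNat (by omega)]
    simp
  | succ fuel ih =>
    intro i t hi hfuel
    by_cases hsq : i * i ≤ (m : Int)
    · have hile : i ≤ (m : Int) := by nlinarith [sq_nonneg (i - 1)]
      have hcast : i = ((i.toNat : Int)) := by omega
      have hsqN : i.toNat * i.toNat ≤ m := by
        have h := hsq; rw [hcast] at h; exact_mod_cast h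
      have hkN : 1 ≤ i.toNat := by omega
      rw [sigmaLoop, dif_pos hsq]
      simp only []
      rw [ih (i + 1) _ (by omega) (by omega)]
      have hi1 : (i + 1).toNat = i.toNat + 1 := by omega
      by_cases hdvd : PySem.Int.mod (m : Int) i = 0
      · rw [if_pos hdvd]
        have hdvdN : i.toNat ∣ m := by
          rw [PySem.Int.mod_eq_zero_iff_dvd] at hdvd
          rw [hcast] at hdvd; exact_mod_cast hdvd
        have hfd : PySem.Int.floordiv (m : Int) i = ((m / i.toNat : Nat) : Int) := by
          rw [hcast]; exact_mod_cast PySem.Int.floordiv_natCast m i.toNat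
        rw [hfd]
        rw [pendingDivs_step_dvd m i.toNat hkN hm hdvdN hsqN]
        by_cases hne : m / i.toNat = i.toNat
        · rw [if_neg (by rw [hne]; omega)]
          rw [hne, Finset.insert_idem, Finset.sum_insert (k_notmem_pending m i.toNat), hi1]
          push_cast
          omega
        · rw [if_pos (by rw [hcast]; exact_mod_cast hne)]
          rw [Finset.sum_insert, Finset.sum_insert (cof_notmem_pending m i.toNat hm hdvdN), hi1]
          · push_cast; omega
          · simp only [Finset.mem_insert]
            push Not
            exact ⟨fun h => hne h.symm, k_notmem_pending m i.toNat⟩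
      · rw [if_neg hdvd]
        have hdvdN : ¬ i.toNat ∣ m := by
          rw [PySem.Int.mod_eq_zero_iff_dvd] at hdvd
          rw [hcast] at hdvd
          exact fun h => hdvd (by exact_mod_cast h)
        rw [pendingDivs_step_not_dvd m i.toNat hdvdN, hi1]
    · rw [sigmaLoop, dif_neg hsq]
      have hlt : m < i.toNat * i.toNat := by
        have hcast : i = ((i.toNat : Int)) := by omega
        rw [not_le, hcast] at hsq
        exact_mod_cast hsq
      rw [pendingDivs_empty m i.toNat hlt]
      simp

-- A-side: the filtered-range sum as a Finset sum
lemma pyRange_one_natCast' (m : Nat) :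
    PySem.List.pyRange 1 (m : Int) = (List.range' 1 (m - 1)).map (fun (k : Nat) => (k : Int)) := by
  induction m with
  | zero => simp [PySem.List.pyRange]
  | succ m ih =>
    rcases Nat.eq_zero_or_pos m with rfl | hm
    · simp [PySem.List.pyRange]
    · have hr : List.range' 1 m = List.range' 1 (m - 1) ++ [1 + (m - 1)] := by
        rw [← List.range'_1_concat]; congr 1; omega
      push_cast
      rw [PySem.List.pyRange_one_succ_right (by exact_mod_cast hm), ih, hr]
      have h2 : 1 + (m - 1) = m := by omega
      simp [h2]

lemma filter_cast_divides (m : Nat) (l : List Nat) :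
    List.filter (fun x => decide (PySem.Int.mod (m : Int) x = 0)) (l.map (fun (k : Nat) => (k : Int)))
      = (l.filter (fun k => decide (k ∣ m))).map (fun (k : Nat) => (k : Int)) := by
  induction l with
  | nil => simp
  | cons a t ih =>
    simp only [List.map_cons, List.filter_cons]
    have hc : (decide (PySem.Int.mod ((m : Nat) : Int) ((a : Nat) : Int) = 0)) = decide (a ∣ m) := by
      simp [Int.natCast_dvd_natCast]
    rw [hc]
    by_cases h : a ∣ m <;> simp [h, ih]

lemma sum_filter_range' (c : Nat) (p : Nat → Prop) [DecidablePred p] :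
    ((List.range' 1 c).filter (fun k => decide (p k))).sum
      = ∑ d ∈ (Finset.Ico 1 (1 + c)).filter (fun d => p d), d := by
  induction c with
  | zero => simp
  | succ c ih =>
    rw [List.range'_1_concat, List.filter_append, List.sum_append, ih]
    rw [Finset.sum_filter, Finset.sum_filter]
    rw [show 1 + (c + 1) = (1 + c) + 1 from rfl, Finset.sum_Ico_succ_top (by omega)]
    by_cases hp : p (1 + c) <;> simp [hp]

lemma sumOfFactors_eq_sum (m : Nat) :
    sumOfFactors (m : Int) = ((∑ d ∈ (Finset.Ico 1 m).filter (fun d => d ∣ m), d : Nat) : Int) := by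
  unfold sumOfFactors
  rw [PySem.List.foldl_append_ite_eq_filter (fun i => PySem.Int.mod (m : Int) i = 0)]
  rw [List.nil_append, pyRange_one_natCast', filter_cast_divides]
  rw [← Nat.cast_list_sum]
  rcases Nat.eq_zero_or_pos m with rfl | hm
  · simp
  · have h := sum_filter_range' (m - 1) (fun d => d ∣ m)
    rw [show 1 + (m - 1) = m by omega] at h
    exact_mod_cast congrArg (fun x : Nat => (x : Int)) h

lemma pendingDivs_one (m : Nat) (hm : 1 ≤ m) :
    pendingDivs m 1 = (Finset.Ico 1 (m + 1)).filter (fun d => d ∣ m) := by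
  unfold pendingDivs
  ext d
  simp only [Finset.mem_filter, Finset.mem_Ico]
  constructor
  · tauto
  · rintro ⟨⟨h1, h2⟩, hdvd⟩
    refine ⟨⟨h1, h2⟩, hdvd, h1, ?_⟩
    have hle : d ≤ m := Nat.le_of_dvd (by omega) hdvd
    exact (Nat.one_le_div_iff (by omega)).2 hle

lemma sum_divisors_split (m : Nat) (hm : 1 ≤ m) :
    ∑ d ∈ (Finset.Ico 1 (m + 1)).filter (fun d => d ∣ m), d
      = (∑ d ∈ (Finset.Ico 1 m).filter (fun d => d ∣ m), d) + m := by
  rw [Finset.sum_filter, Finset.sum_filter, Finset.sum_Ico_succ_top hm]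
  simp

lemma sigma_eq : ∀ n : Int, sigma_proper n = sumOfFactors n := by
  intro n
  by_cases hn : 0 < n
  · have hm1 : 1 ≤ n.toNat := by omega
    have hcast : n = ((n.toNat : Nat) : Int) := by omega
    rw [hcast]
    unfold sigma_proper
    simp only []
    rw [if_pos (by exact_mod_cast (by omega : (0:Int) < (n.toNat : Int)))]
    rw [sigmaLoop_inv n.toNat hm1 (((n.toNat : Int) + 1 - 1).toNat) 1 0 (by omega) rfl]
    rw [show (1 : Int).toNat = 1 from rfl]
    rw [pendingDivs_one n.toNat hm1, sum_divisors_split n.toNat hm1]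
    rw [sumOfFactors_eq_sum]
    push_cast
    omega
  · unfold sigma_proper sumOfFactors
    simp only []
    rw [if_neg hn]
    have hnil : PySem.List.pyRange 1 n = [] := by
      simp [PySem.List.pyRange]; omega
    rw [hnil]
    simp

lemma ofList_foldl_add (c : Int → Prop) [DecidablePred c] (f : Int → Int) :
    ∀ (l acc : List Int),
    PySem.Set.ofList (l.foldl (fun r a => if c a then (r ++ [a]) ++ [f a] else r) acc)
      = l.foldl (fun r a => if c a then PySem.Set.add (PySem.Set.add r a) (f a) else r)
          (PySem.Set.ofList acc)
  | [], _ => rfl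
  | x :: t, acc => by
    simp only [List.foldl_cons]
    by_cases h : c x
    · rw [if_pos h, if_pos h, ofList_foldl_add c f t]
      congr 1
      simp [PySem.Set.ofList_eq_foldl, List.foldl_append]
    · rw [if_neg h, if_neg h, ofList_foldl_add c f t]

-- ===== VERDICT (by name: the statement is the Claim_ definition above) =====
theorem amicable_pair_spec : Claim_equal_amicable_pair := by
  intro limit _
  unfold Spec_amicable_pair amicable_pair amicable_pair_alt
  have hf : sigma_proper = sumOfFactors := funext sigma_eq
  rw [hf]
  simp only []
  congr 1
  exact ofList_foldl_add
    (fun a => a ≠ sumOfFactors a ∧ a = sumOfFactors (sumOfFactors a))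
    sumOfFactors (PySem.List.pyRange 0 (limit + 1)) []
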